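-- pv_equiv track=rewrite | github.com/hanjoondev/zb-study | acmicpc/A01260.py | solution
-- ===== SOURCE A (Python) =====
-- from collections import deque as dq
--
-- def solution(d: dict[int, set[int]], start: int):
--     def dfs(i):
--         if dv[i]:
--             return
--         dv[i] = True
--         res_d.append(i)
--         for w in d[i]:
--             dfs(w)
--
--     d = {k: sorted(v) for k, v in d.items()}
--     bfs_q = dq([start])
--     bv, dv = {k: 0 for k in d.keys()}, {k: 0 for k in d.keys()}
--     bv[start], res_b, res_d = 1, [start], []
--     dfs(start)
--     while bfs_q:
--         u = bfs_q.popleft()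
--         for w in d[u]:
--             if not bv[w]:
--                 bv[w] = True
--                 bfs_q.append(w)
--                 res_b.append(w)
--     return f"{' '.join(map(str, res_d))}\n{' '.join(map(str, res_b))}"
-- ===== SOURCE B (Python) =====
-- from collections import deque as dq
--
-- def solution(d: dict[int, set[int]], start: int):
--     adj = {k: sorted(v) for k, v in d.items()}
--     # DFS: explicit stack, mark on pop, push sorted neighbors reversed so smallest pops first
--     seen, order, stack = set(), [], [start]
--     while stack:
--         u = stack.pop()
--         if u in seen:
--             continue
--         seen.add(u)
--         order.append(u)
--         stack.extend(reversed(adj[u]))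
--     # BFS: collect nodes as they are dequeued (not as they are enqueued)
--     qseen, border, q = {start}, [], dq([start])
--     while q:
--         u = q.popleft()
--         border.append(u)
--         for w in adj[u]:
--             if w not in qseen:
--                 qseen.add(w)
--                 q.append(w)
--     return f"{' '.join(map(str, order))}\n{' '.join(map(str, border))}"
-- ===== Notes on version B (the rewrite author's own statement) =====
-- stated objective: alternative
-- what changed: Replaces the recursive closure-based DFS with an iterative explicit-stack DFS (mark on pop, neighbors pushed in reverse-sorted order) over a visited set instead of a 0/1 dict, and the BFS records nodes when dequeued instead of when enqueued.
import Mathlib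
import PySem

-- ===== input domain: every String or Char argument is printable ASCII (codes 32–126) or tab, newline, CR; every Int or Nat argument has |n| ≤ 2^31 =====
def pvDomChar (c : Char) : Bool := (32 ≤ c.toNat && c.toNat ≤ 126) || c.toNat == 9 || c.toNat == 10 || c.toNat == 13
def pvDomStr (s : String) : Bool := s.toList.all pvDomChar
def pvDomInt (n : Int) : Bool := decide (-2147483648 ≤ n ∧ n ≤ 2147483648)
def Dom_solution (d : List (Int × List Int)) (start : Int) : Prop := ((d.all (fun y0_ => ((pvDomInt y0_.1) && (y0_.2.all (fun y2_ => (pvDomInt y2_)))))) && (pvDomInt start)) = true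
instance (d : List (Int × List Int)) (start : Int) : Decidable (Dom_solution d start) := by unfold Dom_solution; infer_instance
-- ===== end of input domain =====

-- B replaces A's recursive DFS with an explicit-stack DFS over a visited set (mark on pop) and
-- records BFS nodes on dequeue instead of enqueue; same traversal orders, same output string.

-- ===== PORT A =====
-- shared marshalling step: the Python argument is a dict; both A and B then rebuild it as
-- {k: sorted(v) for k, v in d.items()} — one fold building the dict with sorted values.
def pvAdj (d : List (Int × List Int)) : PySem.Dict Int (List Int) :=
  d.foldl (fun acc kv => acc.insert kv.1 (PySem.List.sorted kv.2 (fun x => x) false)) PySem.Dict.empty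

-- {k: 0 for k in d.keys()} (0/True used only for truthiness → Bool values)
def pvFalse (adj : PySem.Dict Int (List Int)) : PySem.Dict Int Bool :=
  adj.keys.foldl (fun a k => a.insert k false) PySem.Dict.empty

-- A's recursive dfs; the fuel is a totality device only (call depth is bounded by the number of
-- dict keys plus one, see pvDfsA_stab below — the fuel given in `solution` is always sufficient).
def pvDfsA (adj : PySem.Dict Int (List Int)) :
    Nat → Int → PySem.Dict Int Bool × List Int → PySem.Dict Int Bool × List Int
  | 0, _, st => st
  | f + 1, i, st =>
    if st.1.getD i false then st
    else (adj.getD i []).foldl (fun s w => pvDfsA adj f w s) (st.1.insert i true, st.2 ++ [i])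

-- A's while-loop BFS: pop left, push unmarked neighbours, record them when pushed.
-- Fuel is a totality device: every dequeued node was enqueued, and each enqueue after the first
-- marks a fresh element of the value universe, so the fuel given below is always sufficient.
def pvBfsA (adj : PySem.Dict Int (List Int)) :
    Nat → List Int → PySem.Dict Int Bool → List Int → List Int
  | 0, _, _, res => res
  | _ + 1, [], _, res => res
  | f + 1, u :: q, bv, res =>
    let s := (adj.getD u []).foldl
      (fun (s : List Int × PySem.Dict Int Bool × List Int) w =>
        if !(s.2.1.getD w false) then (s.1 ++ [w], s.2.1.insert w true, s.2.2 ++ [w]) else s)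
      (q, bv, res)
    pvBfsA adj f s.1 s.2.1 s.2.2

-- sufficient BFS fuel: initial queue (1) + number of distinct neighbour values
def pvFuelB (adj : PySem.Dict Int (List Int)) : Nat :=
  (PySem.List.dedup adj.values.flatten).length + 1

def solution (d : List (Int × List Int)) (start : Int) : String :=
  let adj := pvAdj d
  let bv := (pvFalse adj).insert start true
  let dv := pvFalse adj
  let res_d := (pvDfsA adj (adj.keys.length + 2) start (dv, [])).2
  let res_b := pvBfsA adj (pvFuelB adj) [start] bv [start]
  PySem.Str.join " " (res_d.map PySem.Int.toStr) ++ "\n" ++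
    PySem.Str.join " " (res_b.map PySem.Int.toStr)

-- ===== PORT B =====
-- helpers the stack-DFS termination argument cites by name
theorem pvFilterLenMono {α : Type} (l : List α) (p q : α → Bool)
    (h : ∀ x ∈ l, q x = true → p x = true) :
    (l.filter q).length ≤ (l.filter p).length := by
  rw [← List.countP_eq_length_filter, ← List.countP_eq_length_filter]
  exact List.countP_mono_left h

theorem pvFilterLenStrict {α : Type} (l : List α) (p q : α → Bool)
    (h : ∀ x ∈ l, q x = true → p x = true)
    (x : α) (hx : x ∈ l) (hp : p x = true) (hq : q x = false) :
    (l.filter q).length < (l.filter p).length := by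
  induction l with
  | nil => cases hx
  | cons a t ih =>
    have ht : ∀ y ∈ t, q y = true → p y = true := fun y hy => h y (List.mem_cons_of_mem _ hy)
    rcases List.mem_cons.1 hx with rfl | hxt
    · simp only [List.filter_cons, hq, hp]
      simp only [Bool.false_eq_true, if_false, if_true, List.length_cons]
      exact Nat.lt_succ_of_le (pvFilterLenMono t p q ht)
    · by_cases hqa : q a = true
      · have hpa := h a (List.mem_cons_self ..) hqa
        simp only [List.filter_cons, hqa, hpa, if_true, List.length_cons]
        exact Nat.succ_lt_succ (ih ht hxt)
      · simp only [List.filter_cons, hqa, Bool.false_eq_true, if_false]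
        by_cases hpa : p a = true
        · simp only [hpa, if_true, List.length_cons]
          exact Nat.lt_succ_of_le (Nat.le_of_lt (ih ht hxt))
        · simp only [hpa, Bool.false_eq_true, if_false]
          exact ih ht hxt

theorem pvGetD_nil {ν : Type} (adj : PySem.Dict Int (List ν)) (u : Int)
    (h : u ∉ adj.keys) : adj.getD u [] = [] := by
  apply PySem.Dict.getD_of_not_contains
  by_contra hc
  exact h ((PySem.Dict.contains_iff_mem_keys adj u).1 (by simpa using hc))

theorem pvContainsAdd (s : PySem.Set Int) (u k : Int) :
    (PySem.Set.add s u).contains k = (k == u || s.contains k) := by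
  by_cases hk : k ∈ PySem.Set.add s u
  · rcases (PySem.Set.mem_add s u k).1 hk with hm | rfl
    · simp [PySem.Set.contains, hk, hm]
    · simp [PySem.Set.contains, hk, ]
  · have h1 : k ∉ s := fun hm => hk ((PySem.Set.mem_add s u k).2 (Or.inl hm))
    have h2 : k ≠ u := fun he => hk ((PySem.Set.mem_add s u k).2 (Or.inr he))
    simp [PySem.Set.contains, hk, h1, h2]

-- B's stack DFS. The Python stack pops from the right and pushes reversed(adj[u]); here the list
-- is kept top-first (the reverse of the Python list), so pop = head and the push prepends adj[u]
-- in order — the same elements are popped in the same order.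
def pvDfsB (adj : PySem.Dict Int (List Int)) :
    List Int → PySem.Set Int → List Int → PySem.Set Int × List Int
  | [], seen, order => (seen, order)
  | u :: rest, seen, order =>
    if seen.contains u then pvDfsB adj rest seen order
    else pvDfsB adj (adj.getD u [] ++ rest) (PySem.Set.add seen u) (order ++ [u])
termination_by stack seen _ => ((adj.keys.filter (fun k => !seen.contains k)).length, stack.length)
decreasing_by
  · exact Prod.Lex.right _ (Nat.lt_succ_self _)
  · rename_i hseen
    by_cases hu : u ∈ adj.keys
    · apply Prod.Lex.left
      apply pvFilterLenStrict adj.keys (fun k => !seen.contains k)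
        (fun k => !(PySem.Set.add seen u).contains k)
      · intro x _ hx
        rw [Bool.not_eq_eq_eq_not, Bool.not_true, pvContainsAdd, Bool.or_eq_false_iff] at hx
        simp only [Bool.not_eq_eq_eq_not, Bool.not_true]
        exact hx.2
      · exact hu
      · simp only [Bool.not_eq_eq_eq_not, Bool.not_true]
        exact Bool.not_eq_true (seen.contains u) ▸ (by simpa using hseen)
      · simp only [Bool.not_eq_eq_eq_not, Bool.not_false, pvContainsAdd]
        simp
    · have hnil : adj.getD u [] = [] := pvGetD_nil adj u hu
      rw [hnil]
      have hfe : adj.keys.filter (fun k => !(PySem.Set.add seen u).contains k)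
          = adj.keys.filter (fun k => !seen.contains k) := by
        apply List.filter_congr
        intro k hk
        have : k ≠ u := fun he => hu (he ▸ hk)
        rw [pvContainsAdd]
        simp [this]
      rw [hfe]
      exact Prod.Lex.right _ (Nat.lt_succ_self _)

-- B's BFS: same queue discipline as A, but nodes are recorded when dequeued and the marking is a set.
def pvBfsB (adj : PySem.Dict Int (List Int)) :
    Nat → List Int → PySem.Set Int → List Int → List Int
  | 0, _, _, res => res
  | _ + 1, [], _, res => res
  | f + 1, u :: q, qs, res =>
    let s := (adj.getD u []).foldl
      (fun (s : List Int × PySem.Set Int) w =>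
        if !s.2.contains w then (s.1 ++ [w], PySem.Set.add s.2 w) else s)
      (q, qs)
    pvBfsB adj f s.1 s.2 (res ++ [u])

def solution_alt (d : List (Int × List Int)) (start : Int) : String :=
  let adj := pvAdj d
  let order := (pvDfsB adj [start] PySem.Set.empty []).2
  let border := pvBfsB adj (pvFuelB adj) [start] (PySem.Set.ofList [start]) []
  PySem.Str.join " " (order.map PySem.Int.toStr) ++ "\n" ++
    PySem.Str.join " " (border.map PySem.Int.toStr)

-- ===== PRECONDITION & SPEC =====
-- the set of nodes reachable from start (standard closure of the edge relation; not either
-- port's traversal — no stack, queue or visiting order)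
def pvReach (d : List (Int × List Int)) (start : Int) : List Int :=
  (fun S => PySem.List.dedup
      (S ++ (d.filterMap (fun p => if p.1 ∈ S then some p.2 else none)).flatten))^[
    d.foldl (fun a p => a + 1 + p.2.length) 1] [start]

-- Pre_ excludes exactly the inputs on which Python A raises KeyError: A looks up dv[i]/d[i]/bv[w]
-- precisely at the nodes reachable from start, so it raises iff start or some reachable node is
-- not a key of d.
def Pre_solution (d : List (Int × List Int)) (start : Int) : Prop :=
  start ∈ d.map Prod.fst ∧ ∀ u ∈ pvReach d start, u ∈ d.map Prod.fst
instance (d : List (Int × List Int)) (start : Int) : Decidable (Pre_solution d start) := by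
  unfold Pre_solution; infer_instance

def pvWitness_solution : (List (Int × List Int)) × Int := ([(1, [2]), (2, [1, 3]), (3, [])], 1)

def Spec_solution (d : List (Int × List Int)) (start : Int) (out : String) : Prop := out = solution_alt d start
instance (d : List (Int × List Int)) (start : Int) (out : String) : Decidable (Spec_solution d start out) := by unfold Spec_solution; infer_instance

-- ===== CLAIM (what is proved, stated in full; the proofs are below) =====
def Claim_equal_solution : Prop := ∀ (d : List (Int × List Int)) (start : Int), Dom_solution d start → Pre_solution d start → Spec_solution d start (solution d start)

-- ===== LEMMAS AND PROOFS =====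

-- number of adjacency keys not yet marked true in dv
def pvUnmarked (adj : PySem.Dict Int (List Int)) (dv : PySem.Dict Int Bool) : Nat :=
  (adj.keys.filter (fun k => !dv.getD k false)).length

-- dv (dict of booleans) and seen (set) mark the same nodes
def pvMatch (dv : PySem.Dict Int Bool) (s : PySem.Set Int) : Prop :=
  ∀ k : Int, dv.getD k false = s.contains k

theorem pvFalseAux (l : List Int) (a : PySem.Dict Int Bool)
    (h : ∀ j : Int, a.getD j false = false) (k : Int) :
    (l.foldl (fun a k => a.insert k false) a).getD k false = false := by
  induction l generalizing a with
  | nil => exact h k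
  | cons x t ih =>
    simp only [List.foldl_cons]
    refine ih _ (fun j => ?_)
    rw [PySem.Dict.getD_insert]
    split
    · rfl
    · exact h j

theorem pvFalse_getD (adj : PySem.Dict Int (List Int)) (k : Int) :
    (pvFalse adj).getD k false = false := by
  unfold pvFalse
  exact pvFalseAux _ _ (fun j => by simp [PySem.Dict.getD_empty]) k

-- marks only grow under A's dfs
theorem pvDfsA_mono (adj : PySem.Dict Int (List Int)) (f : Nat) :
    (∀ i st k, st.1.getD k false = true → (pvDfsA adj f i st).1.getD k false = true) ∧
    (∀ (ws : List Int) st k, st.1.getD k false = true →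
      ((ws.foldl (fun s w => pvDfsA adj f w s) st).1.getD k false = true)) := by
  induction f with
  | zero =>
    constructor
    · intro i st k h; simpa [pvDfsA] using h
    · intro ws st k h
      induction ws generalizing st with
      | nil => simpa using h
      | cons w t ih =>
        simp only [List.foldl_cons]
        exact ih _ (by simpa [pvDfsA] using h)
  | succ f ih =>
    have hone : ∀ i st k, st.1.getD k false = true →
        (pvDfsA adj (f + 1) i st).1.getD k false = true := by
      intro i st k h
      rw [pvDfsA]
      split
      · exact h
      · refine ih.2 (adj.getD i []) (st.1.insert i true, st.2 ++ [i]) k ?_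
        show (st.1.insert i true).getD k false = true
        rw [PySem.Dict.getD_insert]
        split
        · rfl
        · exact h
    refine ⟨hone, ?_⟩
    intro ws st k h
    induction ws generalizing st with
    | nil => simpa using h
    | cons w t iw =>
      simp only [List.foldl_cons]
      exact iw _ (hone w st k h)

theorem pvDfsA_unmarked_le (adj : PySem.Dict Int (List Int)) (f : Nat) (i : Int)
    (st : PySem.Dict Int Bool × List Int) :
    pvUnmarked adj (pvDfsA adj f i st).1 ≤ pvUnmarked adj st.1 := by
  unfold pvUnmarked
  apply pvFilterLenMono
  intro x _ hx
  simp only [Bool.not_eq_eq_eq_not, Bool.not_true] at hx ⊢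
  by_contra hc
  have := (pvDfsA_mono adj f).1 i st x (by simpa using hc)
  rw [this] at hx
  cases hx

-- marking an unmarked key strictly decreases the unmarked count; marking anything never raises it
theorem pvUnmarkedInsertLe (adj : PySem.Dict Int (List Int)) (dv : PySem.Dict Int Bool) (u : Int) :
    pvUnmarked adj (dv.insert u true) ≤ pvUnmarked adj dv := by
  unfold pvUnmarked
  apply pvFilterLenMono
  intro x _ hx
  simp only [Bool.not_eq_eq_eq_not, Bool.not_true, PySem.Dict.getD_insert] at hx ⊢
  split at hx
  · cases hx
  · exact hx

theorem pvUnmarkedInsertLt (adj : PySem.Dict Int (List Int)) (dv : PySem.Dict Int Bool) (u : Int)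
    (hu : u ∈ adj.keys) (hdv : dv.getD u false = false) :
    pvUnmarked adj (dv.insert u true) < pvUnmarked adj dv := by
  unfold pvUnmarked
  apply pvFilterLenStrict adj.keys (fun k => !dv.getD k false)
    (fun k => !(dv.insert u true).getD k false) ?_ u hu (by simp [hdv])
    (by simp [PySem.Dict.getD_insert_self])
  intro x _ hx
  simp only [Bool.not_eq_eq_eq_not, Bool.not_true, PySem.Dict.getD_insert] at hx ⊢
  split at hx
  · cases hx
  · exact hx

-- fuel stability: any fuel strictly above the number of unmarked keys gives the same result
theorem pvFoldA_stabAux (adj : PySem.Dict Int (List Int)) (n f g : Nat)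
    (hM : ∀ (i : Int) (st : PySem.Dict Int Bool × List Int),
      pvUnmarked adj st.1 ≤ n → pvDfsA adj f i st = pvDfsA adj g i st) :
    ∀ (ws : List Int) (st : PySem.Dict Int Bool × List Int), pvUnmarked adj st.1 ≤ n →
      ws.foldl (fun s w => pvDfsA adj f w s) st = ws.foldl (fun s w => pvDfsA adj g w s) st := by
  intro ws
  induction ws with
  | nil => intro st _; rfl
  | cons w t ih =>
    intro st hst
    simp only [List.foldl_cons]
    rw [← hM w st hst]
    exact ih _ (le_trans (pvDfsA_unmarked_le adj f w st) hst)

theorem pvDfsA_stab (adj : PySem.Dict Int (List Int)) :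
    ∀ (n f g : Nat) (i : Int) (st : PySem.Dict Int Bool × List Int),
      pvUnmarked adj st.1 ≤ n → n < f → n < g →
      pvDfsA adj f i st = pvDfsA adj g i st := by
  intro n
  induction n with
  | zero =>
    intro f g i st hn hf hg
    obtain ⟨f', rfl⟩ : ∃ f', f = f' + 1 := ⟨f - 1, by omega⟩
    obtain ⟨g', rfl⟩ : ∃ g', g = g' + 1 := ⟨g - 1, by omega⟩
    rw [pvDfsA, pvDfsA]
    split
    · rfl
    · rename_i hdv
      have hdv' : st.1.getD i false = false := by simpa using hdv
      have hu : i ∉ adj.keys := by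
        intro hu
        have h1 : i ∈ adj.keys.filter (fun k => !st.1.getD k false) :=
          List.mem_filter.2 ⟨hu, by simp [hdv']⟩
        have h2 : (adj.keys.filter (fun k => !st.1.getD k false)).length = 0 := Nat.le_zero.1 hn
        rw [List.length_eq_zero_iff] at h2
        rw [h2] at h1
        cases h1
      rw [pvGetD_nil adj i hu]
      rfl
  | succ n ih =>
    intro f g i st hn hf hg
    obtain ⟨f', rfl⟩ : ∃ f', f = f' + 1 := ⟨f - 1, by omega⟩
    obtain ⟨g', rfl⟩ : ∃ g', g = g' + 1 := ⟨g - 1, by omega⟩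
    rw [pvDfsA, pvDfsA]
    split
    · rfl
    · rename_i hdv
      have hdv' : st.1.getD i false = false := by simpa using hdv
      by_cases hu : i ∈ adj.keys
      · have hlt := pvUnmarkedInsertLt adj st.1 i hu hdv'
        have hst' : pvUnmarked adj (st.1.insert i true) ≤ n := by omega
        have h1 := pvFoldA_stabAux adj n f' (n + 1)
          (fun j st' h => ih f' (n + 1) j st' h (by omega) (Nat.lt_succ_self n))
          (adj.getD i []) (st.1.insert i true, st.2 ++ [i]) hst'
        have h2 := pvFoldA_stabAux adj n g' (n + 1)
          (fun j st' h => ih g' (n + 1) j st' h (by omega) (Nat.lt_succ_self n))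
          (adj.getD i []) (st.1.insert i true, st.2 ++ [i]) hst'
        rw [h1, h2]
      · rw [pvGetD_nil adj i hu]
        rfl

theorem pvFoldA_stab (adj : PySem.Dict Int (List Int)) (n f g : Nat) (ws : List Int)
    (st : PySem.Dict Int Bool × List Int)
    (hn : pvUnmarked adj st.1 ≤ n) (hf : n < f) (hg : n < g) :
    ws.foldl (fun s w => pvDfsA adj f w s) st = ws.foldl (fun s w => pvDfsA adj g w s) st := by
  exact pvFoldA_stabAux adj n f g
    (fun i st' h => pvDfsA_stab adj n f g i st' h hf hg) ws st hn

-- bridge: the explicit-stack DFS equals folding A's recursive dfs over the stack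
theorem pvDfsBridge (adj : PySem.Dict Int (List Int)) :
    ∀ (stack : List Int) (seen : PySem.Set Int) (order : List Int)
      (dv : PySem.Dict Int Bool) (f : Nat),
      pvMatch dv seen → pvUnmarked adj dv < f →
      (stack.foldl (fun s w => pvDfsA adj f w s) (dv, order)).2 = (pvDfsB adj stack seen order).2 ∧
      pvMatch (stack.foldl (fun s w => pvDfsA adj f w s) (dv, order)).1
        (pvDfsB adj stack seen order).1 := by
  intro stack seen order
  induction stack, seen, order using pvDfsB.induct adj with
  | case1 seen order =>
    intro dv f hm hf
    rw [pvDfsB]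
    exact ⟨rfl, hm⟩
  | case2 u rest seen order hc ih =>
    intro dv f hm hf
    obtain ⟨f', rfl⟩ : ∃ f', f = f' + 1 := ⟨f - 1, by omega⟩
    rw [pvDfsB, if_pos hc]
    simp only [List.foldl_cons]
    have h1 : pvDfsA adj (f' + 1) u (dv, order) = (dv, order) := by
      rw [pvDfsA, if_pos]
      show (dv, order).1.getD u false = true
      rw [hm u]
      exact hc
    rw [h1]
    exact ih dv (f' + 1) hm hf
  | case3 u rest seen order hc ih =>
    intro dv f hm hf
    obtain ⟨f', rfl⟩ : ∃ f', f = f' + 1 := ⟨f - 1, by omega⟩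
    rw [pvDfsB, if_neg hc]
    simp only [List.foldl_cons]
    have hdvu : dv.getD u false = false := by
      rw [hm u]
      simpa using hc
    have h1 : pvDfsA adj (f' + 1) u (dv, order)
        = (adj.getD u []).foldl (fun s w => pvDfsA adj f' w s) (dv.insert u true, order ++ [u]) := by
      rw [pvDfsA, if_neg (by simp [hdvu])]
    rw [h1]
    have hm' : pvMatch (dv.insert u true) (PySem.Set.add seen u) := by
      intro k
      rw [PySem.Dict.getD_insert, pvContainsAdd]
      split
      · rename_i hk
        simp [hk]
      · rename_i hk
        rw [hm k]
        simp [hk]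
    have hle : pvUnmarked adj (dv.insert u true) ≤ pvUnmarked adj dv := pvUnmarkedInsertLe adj dv u
    by_cases hu : u ∈ adj.keys
    · have hlt := pvUnmarkedInsertLt adj dv u hu hdvu
      have hfold : (adj.getD u []).foldl (fun s w => pvDfsA adj f' w s) (dv.insert u true, order ++ [u])
          = (adj.getD u []).foldl (fun s w => pvDfsA adj (f' + 1) w s) (dv.insert u true, order ++ [u]) :=
        pvFoldA_stab adj (pvUnmarked adj (dv.insert u true)) f' (f' + 1) _ _
          le_rfl (by omega) (by omega)
      rw [hfold, ← List.foldl_append]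
      exact ih (dv.insert u true) (f' + 1) hm' (by omega)
    · have hnil := pvGetD_nil adj u hu
      have h3 : (adj.getD u [] ++ rest) = rest := by rw [hnil]; rfl
      rw [hnil]
      simp only [List.foldl_nil]
      have := ih (dv.insert u true) (f' + 1) hm' (by omega)
      rw [h3] at this
      exact this

-- BFS inner loop: both folds push the same fresh nodes, keep matching marks, and each push
-- consumes one distinct unmarked element of the value universe
theorem pvBfsFold (adj : PySem.Dict Int (List Int)) :
    ∀ (ws : List Int) (q : List Int) (bv : PySem.Dict Int Bool) (qs : PySem.Set Int)
      (resA : List Int),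
      pvMatch bv qs → (∀ w ∈ ws, w ∈ adj.values.flatten) →
      ∃ pushed bv' qs',
        (ws.foldl (fun (s : List Int × PySem.Dict Int Bool × List Int) w =>
            if !(s.2.1.getD w false) then (s.1 ++ [w], s.2.1.insert w true, s.2.2 ++ [w]) else s)
          (q, bv, resA)) = (q ++ pushed, bv', resA ++ pushed) ∧
        (ws.foldl (fun (s : List Int × PySem.Set Int) w =>
            if !s.2.contains w then (s.1 ++ [w], PySem.Set.add s.2 w) else s) (q, qs))
          = (q ++ pushed, qs') ∧
        pvMatch bv' qs' ∧
        pushed.length +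
            ((PySem.List.dedup adj.values.flatten).filter (fun x => !bv'.getD x false)).length ≤
          ((PySem.List.dedup adj.values.flatten).filter (fun x => !bv.getD x false)).length := by
  intro ws
  induction ws with
  | nil =>
    intro q bv qs resA hm _
    exact ⟨[], bv, qs, by simp, by simp, hm, by simp⟩
  | cons w t ih =>
    intro q bv qs resA hm hU
    have hUt : ∀ x ∈ t, x ∈ adj.values.flatten := fun x hx => hU x (List.mem_cons_of_mem _ hx)
    simp only [List.foldl_cons]
    by_cases hw : bv.getD w false = true
    · have hqs : qs.contains w = true := by rw [← hm w]; exact hw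
      rw [if_neg (by rw [hw]; simp), if_neg (by rw [hqs]; simp)]
      exact ih q bv qs resA hm hUt
    · have hw' : bv.getD w false = false := by simpa using hw
      have hqs : qs.contains w = false := by rw [← hm w]; exact hw'
      rw [if_pos (by rw [hw']; simp), if_pos (by rw [hqs]; simp)]
      have hm1 : pvMatch (bv.insert w true) (PySem.Set.add qs w) := by
        intro k
        rw [PySem.Dict.getD_insert, pvContainsAdd]
        split
        · rename_i hk; simp [hk]
        · rename_i hk; rw [hm k]; simp [hk]
      obtain ⟨p, bv', qs', hA, hB, hm', hlen⟩ :=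
        ih (q ++ [w]) (bv.insert w true) (PySem.Set.add qs w) (resA ++ [w]) hm1 hUt
      refine ⟨w :: p, bv', qs', ?_, ?_, hm', ?_⟩
      · rw [hA]; simp
      · rw [hB]; simp
      · have hwU : w ∈ PySem.List.dedup adj.values.flatten := by
          rw [PySem.List.mem_dedup]
          exact hU w (List.mem_cons_self ..)
        have hstrict : ((PySem.List.dedup adj.values.flatten).filter
              (fun x => !(bv.insert w true).getD x false)).length <
            ((PySem.List.dedup adj.values.flatten).filter (fun x => !bv.getD x false)).length := by
          apply pvFilterLenStrict _ _ _ ?_ w hwU (by simp [hw']) (by simp [PySem.Dict.getD_insert_self])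
          intro x _ hx
          simp only [Bool.not_eq_eq_eq_not, Bool.not_true, PySem.Dict.getD_insert] at hx ⊢
          split at hx
          · cases hx
          · exact hx
        simp only [List.length_cons]
        omega

theorem pvGetDSubFlatten (adj : PySem.Dict Int (List Int)) (u w : Int)
    (hw : w ∈ adj.getD u []) : w ∈ adj.values.flatten := by
  cases hq : adj.get? u with
  | none =>
    rw [PySem.Dict.getD_eq_get?_getD, hq] at hw
    cases hw
  | some l =>
    rw [PySem.Dict.getD_eq_get?_getD, hq] at hw
    have hitems : (u, l) ∈ adj.items := PySem.Dict.mem_items_of_get?_eq_some adj hq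
    have hval : l ∈ adj.values := by
      simp only [PySem.Dict.values]
      exact List.mem_map.2 ⟨(u, l), hitems, rfl⟩
    exact List.mem_flatten.2 ⟨l, hval, hw⟩

theorem pvBfsBridge (adj : PySem.Dict Int (List Int)) :
    ∀ (f : Nat) (q : List Int) (bv : PySem.Dict Int Bool) (qs : PySem.Set Int)
      (resA resB : List Int),
      pvMatch bv qs → resA = resB ++ q →
      q.length +
          ((PySem.List.dedup adj.values.flatten).filter (fun x => !bv.getD x false)).length ≤ f →
      pvBfsA adj f q bv resA = pvBfsB adj f q qs resB := by
  intro f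
  induction f with
  | zero =>
    intro q bv qs resA resB hm hres hlen
    have hq : q = [] := List.length_eq_zero_iff.1 (by omega)
    subst hq
    rw [pvBfsA, pvBfsB, hres, List.append_nil]
  | succ f ih =>
    intro q bv qs resA resB hm hres hlen
    cases q with
    | nil =>
      rw [pvBfsA, pvBfsB, hres, List.append_nil]
    | cons u q =>
      rw [pvBfsA, pvBfsB]
      obtain ⟨p, bv', qs', hA, hB, hm', hp⟩ :=
        pvBfsFold adj (adj.getD u []) q bv qs resA hm (fun w hw => pvGetDSubFlatten adj u w hw)
      simp only [hA, hB]
      refine ih (q ++ p) bv' qs' (resA ++ p) (resB ++ [u]) hm' ?_ ?_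
      · rw [hres]
        simp
      · simp only [List.length_cons, List.length_append] at hlen ⊢
        omega

theorem pvResD_eq (d : List (Int × List Int)) (start : Int) :
    (pvDfsA (pvAdj d) ((pvAdj d).keys.length + 2) start (pvFalse (pvAdj d), [])).2
      = (pvDfsB (pvAdj d) [start] PySem.Set.empty []).2 := by
  have hm0 : pvMatch (pvFalse (pvAdj d)) PySem.Set.empty := by
    intro k
    rw [pvFalse_getD]
    rfl
  have hf0 : pvUnmarked (pvAdj d) (pvFalse (pvAdj d)) < (pvAdj d).keys.length + 2 := by
    have := List.length_filter_le (fun k => !(pvFalse (pvAdj d)).getD k false) (pvAdj d).keys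
    unfold pvUnmarked
    omega
  have h := (pvDfsBridge (pvAdj d) [start] PySem.Set.empty [] (pvFalse (pvAdj d))
    ((pvAdj d).keys.length + 2) hm0 hf0).1
  simpa only [List.foldl_cons, List.foldl_nil] using h

theorem pvResB_eq (d : List (Int × List Int)) (start : Int) :
    pvBfsA (pvAdj d) (pvFuelB (pvAdj d)) [start] ((pvFalse (pvAdj d)).insert start true) [start]
      = pvBfsB (pvAdj d) (pvFuelB (pvAdj d)) [start] (PySem.Set.ofList [start]) [] := by
  have hof : PySem.Set.ofList [start] = [start] := rfl
  have hm1 : pvMatch ((pvFalse (pvAdj d)).insert start true) (PySem.Set.ofList [start]) := by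
    intro k
    rw [hof, PySem.Dict.getD_insert]
    split
    · rename_i hk
      simp [PySem.Set.contains, hk]
    · rename_i hk
      rw [pvFalse_getD]
      simp [PySem.Set.contains, hk]
  refine pvBfsBridge (pvAdj d) (pvFuelB (pvAdj d)) [start] _ _ [start] [] hm1 (by simp) ?_
  have := List.length_filter_le
    (fun x => !((pvFalse (pvAdj d)).insert start true).getD x false)
    (PySem.List.dedup (pvAdj d).values.flatten)
  unfold pvFuelB
  simp only [List.length_cons, List.length_nil]
  omega

-- ===== VERDICT (by name: the statement is the Claim_ definition above) =====
theorem solution_spec : Claim_equal_solution := by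
  unfold Claim_equal_solution
  intro d start _ _
  unfold Spec_solution solution solution_alt
  simp only []
  rw [pvResD_eq d start, pvResB_eq d start]
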